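-- pv_equiv track=rewrite | github.com/Albertree/SOAR-ARC-test | procedural_memory/base_rules/_primitives.py | find_separator_lines
-- ===== SOURCE A (Python) =====
-- def find_separator_lines(grid, bg=0):
--     """Find full-width rows or full-height columns of uniform non-bg color.
--     Returns {'rows': [(row_idx, color), ...], 'cols': [(col_idx, color), ...]}."""
--     h = len(grid)
--     w = len(grid[0]) if grid else 0
--     rows = []
--     for r in range(h):
--         vals = set(grid[r])
--         if len(vals) == 1 and vals.pop() != bg:
--             rows.append((r, grid[r][0]))
--     cols = []
--     for c in range(w):
--         vals = set(grid[r][c] for r in range(h))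
--         if len(vals) == 1 and vals.pop() != bg:
--             cols.append((c, grid[0][c]))
--     return {"rows": rows, "cols": cols}
-- ===== SOURCE B (Python) =====
-- def _step(state, v):
--     c0, uniform = state
--     if c0 is None:
--         return (v, uniform)
--     return (c0, uniform and v == c0)
--
--
-- def find_separator_lines(grid, bg=0):
--     """Single sweep: fold every row once, updating the row's own
--     first-color/uniform state and all per-column states together."""
--     w = len(grid[0]) if grid else 0
--     col_state = [(None, True)] * w
--     rows = []
--     for r, row in enumerate(grid):
--         state = (None, True)
--         for v in row:
--             state = _step(state, v)
--         c0, uniform = state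
--         if uniform and c0 is not None and c0 != bg:
--             rows.append((r, c0))
--         col_state = [_step(s, v) for s, v in zip(col_state, row)]
--     cols = [(c, c0) for c, (c0, uniform) in enumerate(col_state)
--             if uniform and c0 is not None and c0 != bg]
--     return {"rows": rows, "cols": cols}
-- ===== Notes on version B (the rewrite author's own statement) =====
-- stated objective: alternative
-- what changed: Replaces A's two independent nested scans (a per-row set build, then a per-column generator indexing grid[r][c]) by a single sweep over the rows that folds each row once while updating all per-column first-color/uniform states via zip, then assembles rows and cols from the accumulated states.
import Mathlib
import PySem

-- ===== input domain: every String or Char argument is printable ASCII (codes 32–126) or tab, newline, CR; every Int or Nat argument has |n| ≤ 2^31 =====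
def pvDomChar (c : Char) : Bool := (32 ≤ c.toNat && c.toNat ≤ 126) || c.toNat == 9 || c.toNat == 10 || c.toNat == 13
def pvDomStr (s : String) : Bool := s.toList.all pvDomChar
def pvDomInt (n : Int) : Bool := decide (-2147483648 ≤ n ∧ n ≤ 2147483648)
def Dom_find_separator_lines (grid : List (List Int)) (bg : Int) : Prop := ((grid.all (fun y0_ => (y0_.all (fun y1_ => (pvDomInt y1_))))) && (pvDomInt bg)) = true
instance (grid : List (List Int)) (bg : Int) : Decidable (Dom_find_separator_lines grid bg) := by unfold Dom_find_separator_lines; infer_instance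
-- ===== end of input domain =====

-- B replaces A's two separate nested scans by one sweep over the rows that updates
-- per-row and per-column uniform/first-color states together (same O(h*w) cost;
-- objective: alternative decomposition). Equivalence is about the return value.

-- ===== PORT A =====
-- set(...) → PySem.Set.ofList; 'len(vals)==1 and vals.pop()!=bg' : pop() on the
-- singleton set is its unique element, ported as vals.headI (order-independent).
-- grid[r][c] → pyGetD: inside Pre_ every such index is in range, so the default
-- is never read where Python would raise.
def find_separator_lines (grid : List (List Int)) (bg : Int) : List (String × List (Int × Int)) :=
  let h : Int := (grid.length : Int)
  let w : Int := if grid.isEmpty then 0 else ((grid.headI).length : Int)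
  let rows := (PySem.List.pyRange 0 h).foldl (fun rows r =>
    let vals := PySem.Set.ofList (PySem.List.pyGetD grid r [])
    if ((vals.length == 1) && (vals.headI != bg)) then
      rows ++ [(r, PySem.List.pyGetD (PySem.List.pyGetD grid r []) 0 0)]
    else rows) []
  let cols := (PySem.List.pyRange 0 w).foldl (fun cols c =>
    let vals := PySem.Set.ofList ((PySem.List.pyRange 0 h).map (fun r =>
      PySem.List.pyGetD (PySem.List.pyGetD grid r []) c 0))
    if ((vals.length == 1) && (vals.headI != bg)) then
      cols ++ [(c, PySem.List.pyGetD (PySem.List.pyGetD grid 0 []) c 0)]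
    else cols) []
  [("rows", rows), ("cols", cols)]

-- ===== PORT B =====
-- _step(state, v) of Source B
def pvStep (s : Option Int × Bool) (v : Int) : Option Int × Bool :=
  match s.1 with
  | none => (some v, s.2)
  | some c => (some c, s.2 && (v == c))

-- the inner 'for v in row: state = _step(state, v)' loop of Source B
def pvScan (row : List Int) : Option Int × Bool := row.foldl pvStep (none, true)

-- 'uniform and c0 is not None and c0 != bg'
def pvKeep (bg : Int) (st : Option Int × Bool) : Bool :=
  st.2 && st.1.isSome && (st.1.getD 0 != bg)

-- row half of the body of Source B's 'for r, row in enumerate(grid)' loop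
def pvRowUpd (bg : Int) (rows : List (Int × Int)) (e : Int × List Int) : List (Int × Int) :=
  let st := pvScan e.2
  if pvKeep bg st then rows ++ [(e.1, st.1.getD 0)] else rows

-- column half: col_state = [_step(s, v) for s, v in zip(col_state, row)]
def pvColUpd (st : List (Option Int × Bool)) (e : Int × List Int) : List (Option Int × Bool) :=
  (st.zip e.2).map (fun p => pvStep p.1 p.2)

def find_separator_lines_alt (grid : List (List Int)) (bg : Int) : List (String × List (Int × Int)) :=
  let w : Nat := if grid.isEmpty then 0 else (grid.headI).length
  let res := (PySem.List.enumerate grid).foldl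
    (fun (acc : List (Int × Int) × List (Option Int × Bool)) e =>
      (pvRowUpd bg acc.1 e, pvColUpd acc.2 e))
    ([], List.replicate w ((none : Option Int), true))
  let cols := ((PySem.List.enumerate res.2).filter (fun p => pvKeep bg p.2)).map
    (fun p => (p.1, p.2.1.getD 0))
  [("rows", res.1), ("cols", cols)]

-- ===== PRECONDITION & SPEC =====
-- Pre_ excludes exactly the jagged grids in which some row is shorter than the
-- first row: there A's column scan grid[r][c] raises IndexError.
def Pre_find_separator_lines (grid : List (List Int)) (bg : Int) : Prop :=
  ∀ row ∈ grid, grid.headI.length ≤ row.length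
instance (grid : List (List Int)) (bg : Int) : Decidable (Pre_find_separator_lines grid bg) := by unfold Pre_find_separator_lines; infer_instance

def pvWitness_find_separator_lines : List (List Int) × Int := ([[1, 1], [2, 3]], 0)

def Spec_find_separator_lines (grid : List (List Int)) (bg : Int) (out : List (String × List (Int × Int))) : Prop := out = find_separator_lines_alt grid bg
instance (grid : List (List Int)) (bg : Int) (out : List (String × List (Int × Int))) : Decidable (Spec_find_separator_lines grid bg out) := by unfold Spec_find_separator_lines; infer_instance

-- ===== CLAIM (what is proved, stated in full; the proofs are below) =====
def Claim_equal_find_separator_lines : Prop := ∀ (grid : List (List Int)) (bg : Int), Dom_find_separator_lines grid bg → Pre_find_separator_lines grid bg → Spec_find_separator_lines grid bg (find_separator_lines grid bg)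

-- ===== LEMMAS AND PROOFS =====

-- pvScan characterised: first element, uniformity flag
theorem pvScan_some (l : List Int) (a : Int) (u : Bool) :
    l.foldl pvStep (some a, u) = (some a, u && l.all (· == a)) := by
  induction l generalizing u with
  | nil => simp
  | cons v t ih => simp [List.foldl_cons, pvStep, ih, Bool.and_assoc]

theorem pvScan_cons (a : Int) (l : List Int) :
    pvScan (a :: l) = (some a, l.all (· == a)) := by
  simp [pvScan, List.foldl_cons, pvStep, pvScan_some]

-- set(row) of a constant nonempty row is the singleton
theorem ofList_const (a : Int) (l : List Int) (h : ∀ x ∈ l, x = a) :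
    PySem.Set.ofList (a :: l) = [a] := by
  have : ∀ (t : List Int), (∀ x ∈ t, x = a) → List.foldl PySem.Set.add [a] t = [a] := by
    intro t
    induction t with
    | nil => intro _; rfl
    | cons v r ih =>
      intro hv
      have hva : v = a := hv v (by simp)
      have : PySem.Set.add [a] v = [a] := by
        simp [PySem.Set.add, hva]
      simp [List.foldl_cons, this, ih (fun x hx => hv x (by simp [hx]))]
  simpa [PySem.Set.ofList, PySem.Set.empty, List.foldl_cons,
    show PySem.Set.add PySem.Set.empty a = [a] by simp [PySem.Set.add, PySem.Set.empty]] using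
    this l h

-- the per-line condition and value: A's set test = B's scan test
theorem keep_eq (row : List Int) (bg : Int) :
    (((PySem.Set.ofList row).length == 1) && ((PySem.Set.ofList row).headI != bg))
      = pvKeep bg (pvScan row) := by
  cases row with
  | nil => simp [PySem.Set.ofList, PySem.Set.empty, pvScan, pvKeep]
  | cons a l =>
    rw [pvScan_cons]
    by_cases hall : ∀ x ∈ l, x = a
    · have h1 : PySem.Set.ofList (a :: l) = [a] := ofList_const a l hall
      have h2 : l.all (· == a) = true := by simp [List.all_eq_true]; exact hall
      simp [h1, h2, pvKeep]
    · push Not at hall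
      obtain ⟨v, hv, hva⟩ := hall
      have h2 : l.all (· == a) = false := by
        simp [List.all_eq_false]; exact ⟨v, hv, hva⟩
      have h1 : ((PySem.Set.ofList (a :: l)).length == 1) = false := by
        simp only [beq_eq_false_iff_ne, ne_eq]
        intro hlen
        obtain ⟨c, hc⟩ := List.length_eq_one_iff.mp hlen
        have ha : a ∈ PySem.Set.ofList (a :: l) := (PySem.Set.mem_ofList _ _).mpr (by simp)
        have hvm : v ∈ PySem.Set.ofList (a :: l) := (PySem.Set.mem_ofList _ _).mpr (by simp [hv])
        rw [hc] at ha hvm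
        simp at ha hvm
        exact hva (hvm.trans ha.symm)
      simp [h1, h2, pvKeep]

theorem headI_of_keep (row : List Int) (bg : Int)
    (h : pvKeep bg (pvScan row) = true) :
    (PySem.Set.ofList row).headI = (pvScan row).1.getD 0 ∧
      PySem.List.pyGetD row 0 0 = (pvScan row).1.getD 0 ∧ row ≠ [] := by
  cases row with
  | nil => simp [pvScan, pvKeep] at h
  | cons a l =>
    rw [pvScan_cons] at h ⊢
    have hall : l.all (· == a) = true := by
      cases hall : l.all (· == a) with
      | true => rfl
      | false => simp [pvKeep, hall] at h
    have h1 : PySem.Set.ofList (a :: l) = [a] :=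
      ofList_const a l (by simpa [List.all_eq_true] using hall)
    refine ⟨by simp [h1], by simp [PySem.List.pyGetD], by simp⟩

-- the column fold: after sweeping rows g over a state of length ≤ every row,
-- each column's state is the column list folded through pvStep
theorem colfold (g : List (List Int)) (s : List (Option Int × Bool))
    (h : ∀ row ∈ g, s.length ≤ row.length) :
    g.foldl (fun st row => (st.zip row).map (fun p => pvStep p.1 p.2)) s
      = (List.range s.length).map
          (fun c => (g.map (fun row => row.getD c 0)).foldl pvStep (s.getD c (none, true))) := by
  induction g generalizing s with
  | nil =>
    apply List.ext_getElem
    · simp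
    · intro i h1 h2
      simp [List.getD_eq_getElem?_getD, List.getElem?_eq_getElem (by simpa using h2)]
  | cons row g ih =>
    have hrow : s.length ≤ row.length := h row (by simp)
    have hlen : ((s.zip row).map (fun p => pvStep p.1 p.2)).length = s.length := by
      simp [Nat.min_eq_left hrow]
    rw [List.foldl_cons, ih _ (by intro r hr; rw [hlen]; exact h r (by simp [hr])), hlen]
    apply List.ext_getElem
    · simp
    · intro i h1 h2
      simp only [List.getElem_map, List.getElem_range]
      have hi : i < s.length := by simpa using h1
      have hgd : ((s.zip row).map (fun p => pvStep p.1 p.2)).getD i (none, true)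
          = pvStep (s.getD i (none, true)) (row.getD i 0) := by
        simp [List.getD_eq_getElem?_getD,
          List.getElem?_eq_getElem (show i < ((s.zip row).map (fun p => pvStep p.1 p.2)).length by omega),
          List.getElem?_eq_getElem hi,
          List.getElem?_eq_getElem (show i < row.length by omega)]
      rw [hgd]
      simp [List.foldl_cons]

-- rows lists agree
theorem rows_eq (grid : List (List Int)) (bg : Int) :
    (PySem.List.pyRange 0 (grid.length : Int)).foldl (fun rows r =>
      let vals := PySem.Set.ofList (PySem.List.pyGetD grid r [])
      if ((vals.length == 1) && (vals.headI != bg)) then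
        rows ++ [(r, PySem.List.pyGetD (PySem.List.pyGetD grid r []) 0 0)]
      else rows) []
    = (PySem.List.enumerate grid).foldl (fun rows e => pvRowUpd bg rows e) [] := by
  rw [show (PySem.List.enumerate grid)
        = (PySem.List.pyRange 0 (grid.length : Int)).map
            (fun j => (j, PySem.List.pyGetD grid j [])) by
      simpa [PySem.List.len] using PySem.List.enumerate_eq_map_pyRange grid []]
  rw [List.foldl_map]
  simp only [pvRowUpd]
  rw [PySem.List.foldl_append_if
      (fun r => ((PySem.Set.ofList (PySem.List.pyGetD grid r [])).length == 1) &&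
        ((PySem.Set.ofList (PySem.List.pyGetD grid r [])).headI != bg))
      (fun r => (r, PySem.List.pyGetD (PySem.List.pyGetD grid r []) 0 0)),
    PySem.List.foldl_append_if
      (fun r => pvKeep bg (pvScan (PySem.List.pyGetD grid r [])))
      (fun r => (r, (pvScan (PySem.List.pyGetD grid r [])).1.getD 0))]
  rw [List.filter_congr (fun r _ => keep_eq (PySem.List.pyGetD grid r []) bg)]
  refine congrArg _ (List.map_congr_left ?_)
  intro r hr
  have hk := (List.mem_filter.mp hr).2
  exact congrArg _ ((headI_of_keep _ bg hk).2.1)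

-- (replicate w d).getD c d = d
theorem getD_rep {α : Type} (w c : Nat) (d : α) : (List.replicate w d).getD c d = d := by
  rcases Nat.lt_or_ge c w with h | h
  · rw [List.getD_eq_getElem _ _ (by simpa using h)]
    simp
  · rw [List.getD_eq_default _ _ (by simpa using h)]

-- A's per-column value list is B's column list
theorem col_list_eq (grid : List (List Int)) (k : Nat) :
    (PySem.List.pyRange 0 (grid.length : Int)).map (fun r =>
        (PySem.List.pyGetD grid r []).getD k 0)
      = grid.map (fun row => row.getD k 0) := by
  rw [PySem.List.pyRange_zero_natCast, List.map_map]
  apply List.ext_getElem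
  · simp
  · intro i h1 h2
    have hi : i < grid.length := by simpa using h1
    simp [PySem.List.pyGetD_natCast, List.getD_eq_getElem?_getD,
      List.getElem?_eq_getElem hi]

-- cols lists agree (under Pre_)
theorem cols_eq (grid : List (List Int)) (bg : Int)
    (hpre : ∀ row ∈ grid, grid.headI.length ≤ row.length) :
    (PySem.List.pyRange 0 ((if grid.isEmpty then 0 else ((grid.headI).length : Int)))).foldl
      (fun cols c =>
        let vals := PySem.Set.ofList ((PySem.List.pyRange 0 (grid.length : Int)).map (fun r =>
          PySem.List.pyGetD (PySem.List.pyGetD grid r []) c 0))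
        if ((vals.length == 1) && (vals.headI != bg)) then
          cols ++ [(c, PySem.List.pyGetD (PySem.List.pyGetD grid 0 []) c 0)]
        else cols) []
    = ((PySem.List.enumerate
          ((PySem.List.enumerate grid).foldl
            (fun st e => pvColUpd st e)
            (List.replicate (if grid.isEmpty then 0 else (grid.headI).length)
              ((none : Option Int), true)))).filter (fun p => pvKeep bg p.2)).map
        (fun p => (p.1, p.2.1.getD 0)) := by
  have hw : (if grid.isEmpty then 0 else ((grid.headI).length : Int))
      = ((grid.headI.length : Nat) : Int) := by cases grid <;> simp
  have hwn : (if grid.isEmpty then 0 else (grid.headI).length) = grid.headI.length := by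
    cases grid <;> rfl
  rw [hw, hwn]
  -- B's accumulated column states are the per-column scans
  have hfold : (PySem.List.enumerate grid).foldl (fun st e => pvColUpd st e)
      (List.replicate grid.headI.length ((none : Option Int), true))
      = (List.range grid.headI.length).map
          (fun c => pvScan (grid.map (fun row => row.getD c 0))) := by
    have h1 : (PySem.List.enumerate grid).foldl (fun st e => pvColUpd st e)
        (List.replicate grid.headI.length ((none : Option Int), true))
        = ((PySem.List.enumerate grid).map (·.2)).foldl
            (fun st row => (st.zip row).map (fun p => pvStep p.1 p.2))
            (List.replicate grid.headI.length ((none : Option Int), true)) := by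
      rw [List.foldl_map]
      rfl
    rw [h1, PySem.List.map_snd_enumerate,
      colfold grid _ (by intro r hr; simpa using hpre r hr)]
    simp only [List.length_replicate, getD_rep]
    rfl
  rw [hfold]
  -- enumerate of the state list as a map over the index range
  rw [show PySem.List.enumerate (List.map (fun c => pvScan (List.map (fun row => row.getD c 0) grid)) (List.range grid.headI.length))
      = (PySem.List.pyRange 0 ((grid.headI.length : Nat) : Int)).map (fun j => (j, PySem.List.pyGetD (List.map (fun c => pvScan (List.map (fun row => row.getD c 0) grid)) (List.range grid.headI.length)) j ((none : Option Int), true))) by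
    simpa [PySem.List.len] using PySem.List.enumerate_eq_map_pyRange (List.map (fun c => pvScan (List.map (fun row => row.getD c 0) grid)) (List.range grid.headI.length)) ((none : Option Int), true)]
  -- A's loop as filter+map
  rw [PySem.List.foldl_append_if
      (fun c => ((PySem.Set.ofList ((PySem.List.pyRange 0 (grid.length : Int)).map (fun r =>
          PySem.List.pyGetD (PySem.List.pyGetD grid r []) c 0))).length == 1) &&
        ((PySem.Set.ofList ((PySem.List.pyRange 0 (grid.length : Int)).map (fun r =>
          PySem.List.pyGetD (PySem.List.pyGetD grid r []) c 0))).headI != bg))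
      (fun c => (c, PySem.List.pyGetD (PySem.List.pyGetD grid 0 []) c 0))]
  rw [List.filter_map, List.map_map, List.nil_append]
  have hmem : ∀ c ∈ PySem.List.pyRange 0 ((grid.headI.length : Nat) : Int),
      ∃ k : Nat, c = (k : Int) ∧ k < grid.headI.length := by
    intro c hc
    obtain ⟨h0, hlt⟩ := PySem.List.mem_pyRange_one.mp hc
    refine ⟨c.toNat, (Int.toNat_of_nonneg h0).symm, by omega⟩
  rw [List.filter_congr (q := ((fun p => pvKeep bg p.2) ∘ (fun j => (j, PySem.List.pyGetD (List.map (fun c => pvScan (List.map (fun row => row.getD c 0) grid)) (List.range grid.headI.length)) j ((none : Option Int), true)))))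
    (by
      intro c hc
      obtain ⟨k, rfl, hklt⟩ := hmem c hc
      simp only [Function.comp_apply, PySem.List.pyGetD_natCast,
        PySem.List.getD_map_range _ _ _ _ hklt, col_list_eq grid k]
      exact keep_eq _ bg)]
  apply List.map_congr_left
  intro c hc
  obtain ⟨k, rfl, hklt⟩ := hmem c (List.mem_filter.mp hc).1
  have hkeep : pvKeep bg (pvScan (grid.map (fun row => row.getD k 0))) = true := by
    have := (List.mem_filter.mp hc).2
    simpa only [Function.comp_apply, PySem.List.pyGetD_natCast,
      PySem.List.getD_map_range _ _ _ _ hklt] using this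
  have hval := headI_of_keep (grid.map (fun row => row.getD k 0)) bg hkeep
  simp only [Function.comp_apply, PySem.List.pyGetD_natCast,
    PySem.List.getD_map_range _ _ _ _ hklt]
  refine Prod.ext rfl ?_
  rw [← hval.2.1]
  have hne : grid ≠ [] := by
    intro hnil
    rw [hnil] at hval
    simp at hval
  obtain ⟨a, t, rfl⟩ := List.exists_cons_of_ne_nil hne
  simp [PySem.List.pyGetD]

theorem find_separator_lines_spec : Claim_equal_find_separator_lines := by
  intro grid bg _hdom hpre
  unfold Spec_find_separator_lines find_separator_lines find_separator_lines_alt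
  simp only []
  rw [PySem.List.foldl_prod_mk (pvRowUpd bg) pvColUpd]
  simp only []
  rw [rows_eq grid bg, cols_eq grid bg hpre]
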